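-- pv_equiv track=rewrite | github.com/Lanottez/IC_BA_2020 | 1st Term/Data_Structure_and_Algorithms/Codes/Homework/Homework_1/hw01.py | comparison_function
-- ===== SOURCE A (Python) =====
-- def comparison_function(value):
--     """
--     Comparison function for counting_sort
--
--     Parameter:
--         value - integer
--
--     Returns:
--         ??? such that comparisons of return values work as described
--
--     Example use:
--     >>> comparison_function(99) > comparison_function(18783479)
--     True
--     >>> comparison_function(123) > comparison_function(321)
--     False
--     >>> comparison_function(1789) > comparison_function(96861)
--     True
--     """
--     output = []
--     digits = list(range(0,10))[::-1]
--     list_value = list(str(value))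
--     for digit in digits:
--         output.append(list_value.count(str(digit)))
--     output.append(value)
--     return output
-- ===== SOURCE B (Python) =====
-- def comparison_function(value):
--     rest = sorted(str(abs(value)), reverse=True)
--     out = []
--     for d in "9876543210":
--         k = 0
--         while k < len(rest) and rest[k] == d:
--             k += 1
--         out.append(k)
--         rest = rest[k:]
--     out.append(value)
--     return out
-- ===== Notes on version B (the rewrite author's own statement) =====
-- stated objective: alternative
-- what changed: A runs ten separate list.count scans over str(value); B sorts the digits of abs(value) in descending order once and then emits the ten counts by a single run-length scan over the sorted list (consuming each run with a pointer), a sort-then-scan algorithm instead of repeated counting.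
import Mathlib
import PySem

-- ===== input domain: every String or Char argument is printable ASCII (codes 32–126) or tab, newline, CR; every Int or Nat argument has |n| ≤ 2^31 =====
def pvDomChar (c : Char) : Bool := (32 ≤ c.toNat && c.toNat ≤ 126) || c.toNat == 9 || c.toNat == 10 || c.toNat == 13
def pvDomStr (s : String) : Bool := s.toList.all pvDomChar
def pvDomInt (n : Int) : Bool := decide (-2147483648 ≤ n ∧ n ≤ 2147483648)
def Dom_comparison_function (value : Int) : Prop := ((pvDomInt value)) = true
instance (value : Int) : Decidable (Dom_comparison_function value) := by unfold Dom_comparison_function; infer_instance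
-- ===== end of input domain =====

-- B replaces A's ten list.count scans with one descending sort of the digits of abs(value)
-- followed by a single run-length scan emitting the ten counts; same return value, objective: alternative (sort-then-scan).

-- ===== PORT A =====
-- list(str(value)) is a list of one-character strings, modelled as List String;
-- [::-1] is slice? with step -1, which never raises (step ≠ 0), hence the .getD [].
def comparison_function (value : Int) : List Int :=
  let digits : List Int := (PySem.List.slice? (PySem.List.pyRange 0 10 1) none none (-1)).getD []
  let list_value : List String := (PySem.Int.toChars value).map (fun c => String.ofList [c])
  let output : List Int := digits.foldl (fun acc d => acc ++ [((list_value.count (PySem.Int.toStr d) : Nat) : Int)]) []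
  output ++ [value]

-- ===== PORT B =====
-- the inner 'while k < len(rest) and rest[k] == d: k += 1' of Source B: length of the leading run of d
def runLen : List Char → Char → Nat
  | [], _ => 0
  | c :: cs, d => if c = d then runLen cs d + 1 else 0

-- one iteration of Source B's for-loop over "9876543210": append the run length, drop the run
def stepB (st : List Int × List Char) (d : Char) : List Int × List Char :=
  let k := runLen st.2 d
  (st.1 ++ [(k : Int)], st.2.drop k)

def comparison_function_alt (value : Int) : List Int :=
  let rest0 : List Char := PySem.List.sorted (PySem.Int.toChars |value|) (fun c => c) true
  let final := (['9', '8', '7', '6', '5', '4', '3', '2', '1', '0']).foldl stepB ([], rest0)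
  final.1 ++ [value]

-- ===== PRECONDITION & SPEC =====
def Spec_comparison_function (value : Int) (out : List Int) : Prop := out = comparison_function_alt value
instance (value : Int) (out : List Int) : Decidable (Spec_comparison_function value out) := by unfold Spec_comparison_function; infer_instance

-- ===== CLAIM (what is proved, stated in full; the proofs are below) =====
def Claim_equal_comparison_function : Prop := ∀ (value : Int), Dom_comparison_function value → Spec_comparison_function value (comparison_function value)

-- ===== LEMMAS AND PROOFS =====

lemma char_le_iff (a b : Char) : a ≤ b ↔ a.toNat ≤ b.toNat := by
  simp only [Char.le_def, UInt32.le_iff_toNat_le]; exact Iff.rfl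

lemma char_lt_iff (a b : Char) : a < b ↔ a.toNat < b.toNat := by
  simp only [Char.lt_def, UInt32.lt_iff_toNat_lt]; exact Iff.rfl

-- every character str(nat) produces is a digit '0'..'9'
lemma toDigitsCore_digits (f : Nat) : ∀ (n : Nat) (l : List Char),
    (∀ c ∈ l, 48 ≤ c.toNat ∧ c.toNat ≤ 57) →
    ∀ c ∈ Nat.toDigitsCore 10 f n l, 48 ≤ c.toNat ∧ c.toNat ≤ 57 := by
  induction f with
  | zero => intro n l hl; simpa [Nat.toDigitsCore] using hl
  | succ f ih =>
    intro n l hl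
    have hmod : n % 10 < 10 := Nat.mod_lt _ (by norm_num)
    have hd : 48 ≤ (Nat.digitChar (n % 10)).toNat ∧ (Nat.digitChar (n % 10)).toNat ≤ 57 := by
      set k := n % 10 with hk
      interval_cases k <;> decide
    have hl' : ∀ c ∈ Nat.digitChar (n % 10) :: l, 48 ≤ c.toNat ∧ c.toNat ≤ 57 := by
      intro c hc
      rcases List.mem_cons.mp hc with h | h
      · exact h ▸ hd
      · exact hl c h
    simp only [Nat.toDigitsCore]
    split
    · exact hl'
    · exact ih (n / 10) _ hl'

lemma toChars_abs_digits (v : Int) : ∀ c ∈ PySem.Int.toChars |v|, 48 ≤ c.toNat ∧ c.toNat ≤ 57 := by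
  have h : ¬ (|v| < 0) := not_lt.mpr (abs_nonneg v)
  simp only [PySem.Int.toChars, if_neg h, Nat.toDigits]
  exact toDigitsCore_digits _ _ [] (by simp)

-- counting a digit character ignores the leading '-' of a negative value
lemma count_toChars_abs (v : Int) (c : Char) (hc : 48 ≤ c.toNat) :
    (PySem.Int.toChars |v|).count c = (PySem.Int.toChars v).count c := by
  by_cases hv : v < 0
  · have habs : |v| = -v := abs_of_neg hv
    have hnot : ¬ (|v| < 0) := not_lt.mpr (abs_nonneg v)
    have htoNat : |v|.toNat = v.natAbs := by rw [habs]; omega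
    have hne : c ≠ '-' := by
      intro h; rw [h] at hc; revert hc; decide
    simp only [PySem.Int.toChars, if_neg hnot, if_pos hv, htoNat, List.count_cons]
    simp [Ne.symm hne]
  · have habs : |v| = v := abs_of_nonneg (not_lt.mp hv)
    rw [habs]

-- the while loop on a descending list whose entries are all ≤ d:
-- it measures exactly count d, the consumed prefix is all d's, the remainder is all < d
lemma runLen_spec (d : Char) : ∀ (L : List Char), L.Pairwise (fun a b => b ≤ a) →
    (∀ c ∈ L, c ≤ d) →
    runLen L d = L.count d ∧ L.take (runLen L d) = List.replicate (runLen L d) d ∧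
      ∀ c ∈ L.drop (runLen L d), c < d := by
  intro L
  induction L with
  | nil => intro _ _; simp [runLen]
  | cons c t ih =>
    intro hp hle
    obtain ⟨hct, hpt⟩ := List.pairwise_cons.mp hp
    by_cases hcd : c = d
    · subst hcd
      have ht := ih hpt (fun x hx => hle x (List.mem_cons_of_mem _ hx))
      have hr : runLen (c :: t) c = runLen t c + 1 := by simp [runLen]
      rw [hr]
      refine ⟨?_, ?_, ?_⟩
      · rw [List.count_cons_self, ht.1]
      · simp only [List.take_succ_cons, List.replicate_succ, ht.2.1]
      · simpa only [List.drop_succ_cons] using ht.2.2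
    · have hclt : c < d := lt_of_le_of_ne (hle c List.mem_cons_self) hcd
      have hnot : d ∉ c :: t := by
        intro hmem
        rcases List.mem_cons.mp hmem with h | h
        · exact hcd h.symm
        · exact absurd (lt_of_le_of_lt (hct d h) hclt) (lt_irrefl d)
      have hr : runLen (c :: t) d = 0 := by simp [runLen, hcd]
      rw [hr]
      refine ⟨(List.count_eq_zero.mpr hnot).symm, by simp, ?_⟩
      intro x hx
      simp only [List.drop_zero] at hx
      rcases List.mem_cons.mp hx with h | h
      · exact h ▸ hclt
      · exact lt_of_le_of_lt (hct x h) hclt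

-- the digit characters n, n-1, …, 0 that Source B's for-loop still has to process
def dchars : Nat → List Char
  | 0 => [Char.ofNat 48]
  | n + 1 => Char.ofNat (48 + (n + 1)) :: dchars n

lemma char_ofNat_toNat {m : Nat} (hm : m < 55296) : (Char.ofNat m).toNat = m := by
  have hv : Nat.isValidChar m := Or.inl hm
  simp [Char.ofNat, hv, Char.ofNatAux, Char.toNat]

lemma mem_dchars {n : Nat} (hn : n ≤ 9) : ∀ c ∈ dchars n, 48 ≤ c.toNat ∧ c.toNat ≤ 48 + n := by
  induction n with
  | zero =>
    intro c hc
    simp only [dchars, List.mem_singleton] at hc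
    subst hc
    rw [char_ofNat_toNat (by omega)]
    omega
  | succ n ih =>
    intro c hc
    simp only [dchars, List.mem_cons] at hc
    rcases hc with h | h
    · subst h
      rw [char_ofNat_toNat (by omega)]
      omega
    · have := ih (by omega) c h
      omega

-- the whole for-loop: on a descending list bounded by the first digit it emits the ten counts
lemma loop_spec : ∀ (n : Nat), n ≤ 9 → ∀ (rest : List Char) (out : List Int),
    rest.Pairwise (fun a b => b ≤ a) → (∀ c ∈ rest, c.toNat ≤ 48 + n) →
    ((dchars n).foldl stepB (out, rest)).1
      = out ++ (dchars n).map (fun d => ((rest.count d : Nat) : Int)) := by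
  intro n
  induction n with
  | zero =>
    intro _ rest out hp hb
    have hle : ∀ c ∈ rest, c ≤ Char.ofNat 48 := by
      intro c hc
      rw [char_le_iff]
      simpa using hb c hc
    have h := runLen_spec (Char.ofNat 48) rest hp hle
    simp only [dchars, List.foldl_cons, List.foldl_nil, stepB, h.1, List.map]
  | succ n ih =>
    intro hn rest out hp hb
    have hn8 : n ≤ 8 := by omega
    have hdval : (Char.ofNat (48 + (n + 1))).toNat = 48 + (n + 1) :=
      char_ofNat_toNat (by omega)
    have hle : ∀ c ∈ rest, c ≤ Char.ofNat (48 + (n + 1)) := by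
      intro c hc
      rw [char_le_iff, hdval]
      exact hb c hc
    have h := runLen_spec (Char.ofNat (48 + (n + 1))) rest hp hle
    set d := Char.ofNat (48 + (n + 1)) with hd
    set k := runLen rest d with hk
    have hp' : (rest.drop k).Pairwise (fun a b => b ≤ a) := hp.sublist (List.drop_sublist k rest)
    have hb' : ∀ c ∈ rest.drop k, c.toNat ≤ 48 + n := by
      intro c hc
      have := h.2.2 c hc
      rw [char_lt_iff, hdval] at this
      omega
    have hcount : ∀ d' ∈ dchars n, (rest.drop k).count d' = rest.count d' := by
      intro d' hd'
      have hlt : d'.toNat < d.toNat := by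
        rw [hdval]
        have := (mem_dchars (by omega : n ≤ 9) d' hd').2
        omega
      have hne : d' ≠ d := by
        intro h'; rw [h'] at hlt; omega
      conv_rhs => rw [← List.take_append_drop k rest]
      rw [List.count_append, h.2.1, List.count_replicate]
      simp [Ne.symm hne]
    simp only [dchars, List.foldl_cons]
    have hstep : stepB (out, rest) d = (out ++ [(k : Int)], rest.drop k) := rfl
    rw [hstep, ih (by omega) (rest.drop k) _ hp' hb',
      List.map_congr_left (fun d' hd' => by rw [hcount d' hd'])]
    simp [h.1, ← hd, List.append_assoc]

lemma mkStr_inj : Function.Injective (fun c : Char => String.ofList [c]) := by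
  intro a b h
  simpa using congrArg String.toList h

lemma count_map_mkStr (L : List Char) (c : Char) :
    (L.map (fun c => String.ofList [c])).count (String.ofList [c]) = L.count c :=
  List.count_map_of_injective _ _ mkStr_inj c

-- count of a digit char in the sorted digit list of |v| = count in str(v)
lemma count_rest0 (v : Int) (c : Char) (hc : 48 ≤ c.toNat) :
    (PySem.List.sorted (PySem.Int.toChars |v|) (fun x => x) true).count c
      = (PySem.Int.toChars v).count c := by
  rw [(PySem.List.sorted_perm (PySem.Int.toChars |v|) (fun x => x) true).count_eq,
    count_toChars_abs v c hc]

-- ===== VERDICT (by name: the statement is the Claim_ definition above) =====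
theorem comparison_function_spec : Claim_equal_comparison_function := by
  intro v _
  unfold Spec_comparison_function comparison_function comparison_function_alt
  have hp : (PySem.List.sorted (PySem.Int.toChars |v|) (fun c => c) true).Pairwise
      (fun a b => b ≤ a) := PySem.List.sorted_pairwise_rev _ _
  have hb : ∀ c ∈ PySem.List.sorted (PySem.Int.toChars |v|) (fun c => c) true,
      c.toNat ≤ 48 + 9 := by
    intro c hc
    exact (toChars_abs_digits v c ((PySem.List.mem_sorted _ _ _ _).mp hc)).2
  have hloop := loop_spec 9 (by omega)
    (PySem.List.sorted (PySem.Int.toChars |v|) (fun c => c) true) [] hp hb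
  rw [show (['9','8','7','6','5','4','3','2','1','0'] : List Char) = dchars 9 from by decide] at *
  simp only [hloop, List.nil_append]
  simp only [show dchars 9 = ['9','8','7','6','5','4','3','2','1','0'] from by decide,
    List.map_cons, List.map_nil,
    count_rest0 v '9' (by decide), count_rest0 v '8' (by decide),
    count_rest0 v '7' (by decide), count_rest0 v '6' (by decide),
    count_rest0 v '5' (by decide), count_rest0 v '4' (by decide),
    count_rest0 v '3' (by decide), count_rest0 v '2' (by decide),
    count_rest0 v '1' (by decide), count_rest0 v '0' (by decide)]
  simp only [show (PySem.List.slice? (PySem.List.pyRange 0 10 1) none none (-1)).getD []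
      = [9,8,7,6,5,4,3,2,1,0] from by decide, List.foldl, List.nil_append, List.cons_append]
  simp only [show PySem.Int.toStr 9 = String.ofList ['9'] from by decide,
    show PySem.Int.toStr 8 = String.ofList ['8'] from by decide,
    show PySem.Int.toStr 7 = String.ofList ['7'] from by decide,
    show PySem.Int.toStr 6 = String.ofList ['6'] from by decide,
    show PySem.Int.toStr 5 = String.ofList ['5'] from by decide,
    show PySem.Int.toStr 4 = String.ofList ['4'] from by decide,
    show PySem.Int.toStr 3 = String.ofList ['3'] from by decide,
    show PySem.Int.toStr 2 = String.ofList ['2'] from by decide,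
    show PySem.Int.toStr 1 = String.ofList ['1'] from by decide,
    show PySem.Int.toStr 0 = String.ofList ['0'] from by decide,
    count_map_mkStr]
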